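-- pv_equiv track=rewrite | github.com/deborah-powers/python-modules | mediaCls.py | mediaAtraiter
-- ===== SOURCE A (Python) =====
-- alpabet = 'abcdefghijklmnopqrstuvwxyz'
--
-- def mediaAtraiter (imgTitle):
-- 	imgTitle = imgTitle.lower()
-- 	if imgTitle[:4] in ('img_', 'img-', 'vid_') or imgTitle[:6] == 'video_': return True
-- 	else:
-- 		l=0
-- 		while l<26:
-- 			if alpabet[l] in imgTitle: l=27
-- 			l+=1
-- 		if l==28: return False
-- 		else: return True
-- ===== SOURCE B (Python) =====
-- alpabet = 'abcdefghijklmnopqrstuvwxyz'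
--
-- def mediaAtraiter(imgTitle):
-- 	imgTitle = imgTitle.lower()
-- 	if imgTitle[:4] in ('img_', 'img-', 'vid_') or imgTitle[:6] == 'video_':
-- 		return True
-- 	return not any(c in alpabet for c in imgTitle)
-- ===== Notes on version B (the rewrite author's own statement) =====
-- stated objective: simpler
-- what changed: Replaced the 26-step while-loop over the alphabet (with its l=27/28 sentinel arithmetic) by a single early-exiting pass over the title's characters testing membership in the alphabet, returning the negation directly.
import Mathlib
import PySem

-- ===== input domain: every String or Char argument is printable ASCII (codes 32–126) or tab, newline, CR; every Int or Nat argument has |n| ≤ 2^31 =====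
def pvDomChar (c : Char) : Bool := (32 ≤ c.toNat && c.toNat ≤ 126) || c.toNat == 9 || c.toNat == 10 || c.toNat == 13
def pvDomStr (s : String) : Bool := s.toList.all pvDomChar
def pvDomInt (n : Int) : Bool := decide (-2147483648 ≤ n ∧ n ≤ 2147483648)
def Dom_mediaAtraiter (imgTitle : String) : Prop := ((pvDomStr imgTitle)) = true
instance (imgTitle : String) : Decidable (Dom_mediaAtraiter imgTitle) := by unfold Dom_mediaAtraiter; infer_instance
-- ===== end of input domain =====

-- ===== PORT A =====
-- B replaces A's 26-step alphabet while-loop (with its l=27/28 sentinel) by one pass over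
-- the title's characters; return value equivalence, objective: simpler.
def alpabet : List Char := "abcdefghijklmnopqrstuvwxyz".toList

-- the 'while l<26' loop of A: on a hit Python sets l=27 then l+=1, so it exits with l=28
def mediaLoopA (chars : List Char) (l : Nat) : Nat :=
  if l < 26 then
    -- 'alpabet[l] in imgTitle': l < 26 is in range, and the one-char substring test
    -- is exactly char membership, so getD is exact here
    if alpabet.getD l ' ' ∈ chars then mediaLoopA chars 28 else mediaLoopA chars (l + 1)
  else l
termination_by 28 - l
decreasing_by all_goals omega

def mediaAtraiter (imgTitle : String) : Bool :=
  let chars := PySem.Chars.lower imgTitle.toList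
  if PySem.List.slice chars none (some 4) = "img_".toList ∨
     PySem.List.slice chars none (some 4) = "img-".toList ∨
     PySem.List.slice chars none (some 4) = "vid_".toList ∨
     PySem.List.slice chars none (some 6) = "video_".toList then true
  else if mediaLoopA chars 0 = 28 then false else true

-- ===== PORT B =====
def mediaAtraiter_alt (imgTitle : String) : Bool :=
  let chars := PySem.Chars.lower imgTitle.toList
  if PySem.List.slice chars none (some 4) = "img_".toList ∨
     PySem.List.slice chars none (some 4) = "img-".toList ∨
     PySem.List.slice chars none (some 4) = "vid_".toList ∨
     PySem.List.slice chars none (some 6) = "video_".toList then true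
  else !(chars.any (fun c => alpabet.contains c))

-- ===== PRECONDITION & SPEC =====
def Spec_mediaAtraiter (imgTitle : String) (out : Bool) : Prop := out = mediaAtraiter_alt imgTitle
instance (imgTitle : String) (out : Bool) : Decidable (Spec_mediaAtraiter imgTitle out) := by unfold Spec_mediaAtraiter; infer_instance

-- ===== CLAIM (what is proved, stated in full; the proofs are below) =====
def Claim_equal_mediaAtraiter : Prop := ∀ (imgTitle : String), Dom_mediaAtraiter imgTitle → Spec_mediaAtraiter imgTitle (mediaAtraiter imgTitle)

-- ===== LEMMAS AND PROOFS =====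

lemma mediaLoopA_stop (chars : List Char) : mediaLoopA chars 28 = 28 := by
  unfold mediaLoopA; simp

lemma mediaLoopA_spec (chars : List Char) :
    ∀ n l, l + n = 26 →
      (mediaLoopA chars l = 28 ↔ ∃ i, l ≤ i ∧ i < 26 ∧ alpabet.getD i ' ' ∈ chars) := by
  intro n
  induction n with
  | zero =>
    intro l hl
    have hl26 : l = 26 := by omega
    subst hl26
    unfold mediaLoopA
    simp only [lt_irrefl, if_false]
    constructor
    · intro h; omega
    · rintro ⟨i, h1, h2, -⟩; omega
  | succ n ih =>
    intro l hl
    have hlt : l < 26 := by omega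
    rw [mediaLoopA]
    rw [if_pos hlt]
    by_cases hmem : alpabet.getD l ' ' ∈ chars
    · rw [if_pos hmem, mediaLoopA_stop]
      exact ⟨fun _ => ⟨l, le_refl l, hlt, hmem⟩, fun _ => rfl⟩
    · rw [if_neg hmem, ih (l + 1) (by omega)]
      constructor
      · rintro ⟨i, h1, h2, h3⟩; exact ⟨i, by omega, h2, h3⟩
      · rintro ⟨i, h1, h2, h3⟩
        refine ⟨i, ?_, h2, h3⟩
        rcases Nat.eq_or_lt_of_le h1 with h | h
        · exact absurd (h ▸ h3) hmem
        · omega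

lemma loop_eq_any (chars : List Char) :
    (mediaLoopA chars 0 = 28) ↔ (chars.any (fun c => alpabet.contains c) = true) := by
  rw [mediaLoopA_spec chars 26 0 rfl]
  simp only [List.any_eq_true, List.contains_iff_mem, Nat.zero_le, true_and]
  constructor
  · rintro ⟨i, hi, hmem⟩
    refine ⟨alpabet.getD i ' ', hmem, ?_⟩
    have : i < alpabet.length := by simp [alpabet]; omega
    rw [List.getD_eq_getElem _ _ this]
    exact List.getElem_mem this
  · rintro ⟨c, hc, hca⟩
    obtain ⟨i, hi, hgi⟩ := List.mem_iff_getElem.mp hca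
    refine ⟨i, ?_, ?_⟩
    · have : alpabet.length = 26 := by decide
      omega
    · rw [List.getD_eq_getElem _ _ hi, hgi]; exact hc

-- ===== VERDICT (by name: the statement is the Claim_ definition above) =====
theorem mediaAtraiter_spec : Claim_equal_mediaAtraiter := by
  intro imgTitle _
  unfold Spec_mediaAtraiter mediaAtraiter mediaAtraiter_alt
  dsimp only
  set chars := PySem.Chars.lower imgTitle.toList with hch
  split
  · rfl
  · by_cases h : mediaLoopA chars 0 = 28
    · rw [if_pos h, (loop_eq_any chars).mp h]
      rfl
    · rw [if_neg h]
      have ha : chars.any (fun c => alpabet.contains c) = false := by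
        cases hv : chars.any (fun c => alpabet.contains c)
        · rfl
        · exact absurd ((loop_eq_any chars).mpr hv) h
      rw [ha]
      rfl
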